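-- pv_equiv track=rewrite | github.com/TheRoD2k/bioinfo_rosalind | 09_implement_gibbs_sampler/09_implement_gibbs_sampler.py | get_count_matrix
-- ===== SOURCE A (Python) =====
-- MAP = {
--     "A": 0,
--     "C": 1,
--     "G": 2,
--     "T": 3
-- }
--
-- ADDED_CONST = 1
--
-- def get_count_matrix(motifs):
--     count_matrix = [[], [], [], []]
--     for i in range(len(motifs[0])):
--         for nucleotid in range(len(MAP)):
--             count_matrix[nucleotid].append(0)
--         for j in range(len(motifs)):
--             count_matrix[MAP[motifs[j][i]]][i] += 1
--     for i in range(len(count_matrix)):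
--         for j in range(len(count_matrix[i])):
--             count_matrix[i][j] += ADDED_CONST
--     return count_matrix
-- ===== SOURCE B (Python) =====
-- ADDED_CONST = 1
--
-- def get_count_matrix(motifs):
--     return [[col.count(nuc) + ADDED_CONST for col in zip(*motifs)] for nuc in "ACGT"]
-- ===== Notes on version B (the rewrite author's own statement) =====
-- stated objective: alternative
-- what changed: B abandons A's incremental tally matrix entirely: it transposes the motifs into columns with zip(*motifs) and computes each matrix entry directly as col.count(nuc) + 1 in a pure nested comprehension, with no mutable matrix, no index arithmetic and no separate pseudocount pass.
import Mathlib
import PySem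

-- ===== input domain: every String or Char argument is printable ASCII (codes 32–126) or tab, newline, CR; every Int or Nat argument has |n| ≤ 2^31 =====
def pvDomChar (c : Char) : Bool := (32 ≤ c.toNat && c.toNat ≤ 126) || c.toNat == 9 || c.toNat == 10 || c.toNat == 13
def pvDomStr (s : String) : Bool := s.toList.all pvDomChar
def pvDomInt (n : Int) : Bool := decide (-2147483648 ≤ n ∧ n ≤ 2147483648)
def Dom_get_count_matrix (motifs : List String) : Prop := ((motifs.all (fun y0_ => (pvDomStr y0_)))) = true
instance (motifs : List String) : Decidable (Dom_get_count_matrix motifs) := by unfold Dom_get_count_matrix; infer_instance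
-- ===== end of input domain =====

-- B replaces A's incremental tally matrix (grow rows column by column, increment
-- counters, then an add-constant pass) by transposing the motifs into columns
-- (zip) and computing every entry directly as col.count(nuc) + 1: a different
-- algorithm (direct counting per column) of the same cost.

-- Module constants shared by both Python files (MAP, ADDED_CONST)
def pvMAP : PySem.Dict Char Int :=
  PySem.Dict.ofList [('A', 0), ('C', 1), ('G', 2), ('T', 3)]

def pvADDED_CONST : Int := 1

-- MAP[c] as a row index (the default is irrelevant: Pre_ excludes KeyError inputs)
def pvIdx (c : Char) : Nat := (pvMAP.getD c 0).toNat

-- count_matrix[r][i] += 1 (the statement A contains)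
def pvInc (cm : List (List Int)) (r i : Nat) : List (List Int) :=
  cm.modify r (fun row => row.modify i (· + 1))

-- ===== PORT A =====
def get_count_matrix (motifs : List String) : List (List Int) :=
  let cm : List (List Int) :=
    (List.range (motifs.headD "").toList.length).foldl
      (fun cm i =>
        let cm := (List.range 4).foldl
          (fun cm nucleotid => cm.modify nucleotid (fun row => row ++ [0])) cm
        (List.range motifs.length).foldl
          (fun cm j => pvInc cm (pvIdx ((motifs.getD j "").toList.getD i 'A')) i)
          cm)
      [[], [], [], []]
  cm.map (fun row => row.map (· + pvADDED_CONST))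

-- ===== PORT B =====
-- zip(*motifs): emit the tuple of heads while no sequence is exhausted
def pvZip (ls : List (List Char)) : List (List Char) :=
  if h : ls = [] ∨ ls.any List.isEmpty then []
  else (ls.map (fun l => l.headD ' ')) :: pvZip (ls.map List.tail)
termination_by (ls.headD []).length
decreasing_by
  push_neg at h
  obtain ⟨hne, hany⟩ := h
  cases ls with
  | nil => exact absurd rfl hne
  | cons a t =>
    simp only [List.map_cons, List.headD_cons]
    cases a with
    | nil => exact absurd (by simp) hany
    | cons x xs => simp

def get_count_matrix_alt (motifs : List String) : List (List Int) :=
  let columns := pvZip (motifs.map (·.toList))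
  ("ACGT".toList).map (fun nuc =>
    columns.map (fun col => ((col.count nuc : Int) + pvADDED_CONST)))

-- ===== PRECONDITION & SPEC =====
-- Pre_ excludes exactly the inputs on which Python A raises: empty motif lists
-- (IndexError on motifs[0]), motifs shorter than motifs[0] (IndexError), and
-- characters outside "ACGT" in the scanned columns (KeyError on MAP).
def Pre_get_count_matrix (motifs : List String) : Prop :=
  motifs ≠ [] ∧
  ∀ m ∈ motifs, (motifs.headD "").toList.length ≤ m.toList.length ∧
    ((m.toList.take (motifs.headD "").toList.length).all
      (fun c => c ∈ (['A', 'C', 'G', 'T'] : List Char))) = true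
instance (motifs : List String) : Decidable (Pre_get_count_matrix motifs) := by
  unfold Pre_get_count_matrix; infer_instance

def pvWitness_get_count_matrix : List String := ["ACGT", "AAGT", "CCGA"]

def Spec_get_count_matrix (motifs : List String) (out : List (List Int)) : Prop := out = get_count_matrix_alt motifs
instance (motifs : List String) (out : List (List Int)) : Decidable (Spec_get_count_matrix motifs out) := by unfold Spec_get_count_matrix; infer_instance

-- ===== CLAIM (what is proved, stated in full; the proofs are below) =====
def Claim_equal_get_count_matrix : Prop := ∀ (motifs : List String), Dom_get_count_matrix motifs → Pre_get_count_matrix motifs → Spec_get_count_matrix motifs (get_count_matrix motifs)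

-- ===== LEMMAS AND PROOFS =====

-- matrix entry (0 outside the bounds), matrix shape, per-column nucleotide count
def pvEnt (cm : List (List Int)) (r i : Nat) : Int := (cm.getD r []).getD i 0
def pvShape (cm : List (List Int)) (L : Nat) : Prop :=
  cm.length = 4 ∧ ∀ row ∈ cm, row.length = L
def pvCnt (motifs : List String) (i r : Nat) : Int :=
  (motifs.countP (fun m => pvIdx (m.toList.getD i 'A') == r) : Int)

theorem pvIdx_lt (c : Char) : pvIdx c < 4 := by
  have h : pvMAP = PySem.Dict.mk [('A', 0), ('C', 1), ('G', 2), ('T', 3)] := by rfl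
  unfold pvIdx
  rw [h]
  simp only [PySem.Dict.getD, PySem.Dict.get?_mk_cons]
  split_ifs <;> simp [PySem.Dict.get?]

theorem pv_getD_modify {α : Type} (l : List α) (i j : Nat) (f : α → α) (d : α)
    (hi : i < l.length) :
    (l.modify i f).getD j d = if i = j then f (l.getD j d) else l.getD j d := by
  by_cases hj : j < l.length
  · rw [List.getD_eq_getElem _ _ (by simpa using hj), List.getD_eq_getElem _ _ hj,
      List.getElem_modify]
  · have h1 : l.length ≤ j := le_of_not_gt hj
    rw [List.getD_eq_default _ _ (by simpa using h1), List.getD_eq_default _ _ h1,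
      if_neg (by omega)]

theorem pvEnt_inc (cm : List (List Int)) (r i : Nat)
    (hr : r < cm.length) (hi : i < (cm.getD r []).length) (r' i' : Nat) :
    pvEnt (pvInc cm r i) r' i' = pvEnt cm r' i' + (if r' = r ∧ i' = i then 1 else 0) := by
  unfold pvEnt pvInc
  rw [pv_getD_modify _ _ _ _ _ hr]
  by_cases h1 : r = r'
  · subst h1
    rw [if_pos rfl, pv_getD_modify _ _ _ _ _ hi]
    by_cases h2 : i = i'
    · subst h2; simp
    · rw [if_neg h2, if_neg (by tauto)]; omega
  · rw [if_neg h1, if_neg (by tauto)]; omega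

theorem pvShape_inc (cm : List (List Int)) (r i L : Nat) (h : pvShape cm L) :
    pvShape (pvInc cm r i) L := by
  obtain ⟨h4, hrow⟩ := h
  refine ⟨by simpa [pvInc] using h4, ?_⟩
  intro row hm
  unfold pvInc at hm
  rw [List.mem_iff_getElem] at hm
  obtain ⟨j, hj, rfl⟩ := hm
  rw [List.getElem_modify]
  split_ifs
  · rw [List.length_modify]
    exact hrow _ (List.getElem_mem _)
  · exact hrow _ (List.getElem_mem _)

theorem pvRow_len (cm : List (List Int)) (L r : Nat) (h : pvShape cm L)
    (hr : r < cm.length) : (cm.getD r []).length = L := by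
  rw [List.getD_eq_getElem _ _ hr]
  exact h.2 _ (List.getElem_mem hr)

theorem pv_getD_append_zero (row : List Int) (i : Nat) :
    (row ++ [0]).getD i 0 = row.getD i 0 := by
  induction row generalizing i with
  | nil => cases i <;> simp [List.getD]
  | cons a t ih =>
    cases i with
    | zero => simp
    | succ n => simpa using ih n

theorem pvEnt_app (cm : List (List Int)) (r : Nat) (hr : r < cm.length) (r' i' : Nat) :
    pvEnt (cm.modify r (fun row => row ++ [0])) r' i' = pvEnt cm r' i' := by
  unfold pvEnt
  rw [pv_getD_modify _ _ _ _ _ hr]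
  split_ifs with h1
  · rw [pv_getD_append_zero]
  · rfl

-- the "append one 0 to every row" pass of A, as a single step
theorem pvApp4 (cm : List (List Int)) (n : Nat) (h : pvShape cm n) :
    pvShape ((List.range 4).foldl
      (fun cm nucleotid => cm.modify nucleotid (fun row => row ++ [0])) cm) (n + 1) ∧
    ∀ r' i', pvEnt ((List.range 4).foldl
      (fun cm nucleotid => cm.modify nucleotid (fun row => row ++ [0])) cm) r' i'
      = pvEnt cm r' i' := by
  obtain ⟨h4, hrow⟩ := h
  simp only [show List.range 4 = [0, 1, 2, 3] from rfl, List.foldl_cons, List.foldl_nil]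
  have l0 : (cm.modify 0 (fun row => row ++ [0])).length = 4 := by simp [h4]
  have l1 : ((cm.modify 0 (fun row => row ++ [0])).modify 1 (fun row => row ++ [0])).length = 4 := by simp [h4]
  have l2 : (((cm.modify 0 (fun row => row ++ [0])).modify 1 (fun row => row ++ [0])).modify 2 (fun row => row ++ [0])).length = 4 := by simp [h4]
  have l3 : ((((cm.modify 0 (fun row => row ++ [0])).modify 1 (fun row => row ++ [0])).modify 2 (fun row => row ++ [0])).modify 3 (fun row => row ++ [0])).length = 4 := by simp [h4]
  constructor
  · refine ⟨l3, ?_⟩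
    intro row hm
    rw [List.mem_iff_getElem] at hm
    obtain ⟨j, hj, rfl⟩ := hm
    rw [l3] at hj
    simp only [List.getElem_modify]
    have hcm : ∀ (hj' : j < cm.length), cm[j].length = n :=
      fun hj' => hrow _ (List.getElem_mem _)
    split_ifs <;> simp_all <;> omega
  · intro r' i'
    rw [pvEnt_app _ _ (by omega), pvEnt_app _ _ (by omega),
      pvEnt_app _ _ (by omega), pvEnt_app _ _ (by omega)]

-- A's inner count loop over motif indices, at a fixed column
theorem pvA_inner (motifs : List String) (col L : Nat) (hcol : col < L) :
    ∀ k, k ≤ motifs.length → ∀ cm, pvShape cm L →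
      pvShape ((List.range k).foldl
        (fun cm j => pvInc cm (pvIdx ((motifs.getD j "").toList.getD col 'A')) col) cm) L ∧
      ∀ r' i', pvEnt ((List.range k).foldl
        (fun cm j => pvInc cm (pvIdx ((motifs.getD j "").toList.getD col 'A')) col) cm) r' i'
        = pvEnt cm r' i' +
          (if i' = col then pvCnt (motifs.take k) col r' else 0) := by
  intro k
  induction k with
  | zero => intro _ cm h; simp [pvCnt, h]
  | succ k ih =>
    intro hk cm h
    have hk' : k ≤ motifs.length := by omega
    obtain ⟨ihs, ihe⟩ := ih hk' cm h
    rw [List.range_succ, List.foldl_append, List.foldl_cons, List.foldl_nil]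
    set F := (List.range k).foldl
      (fun cm j => pvInc cm (pvIdx ((motifs.getD j "").toList.getD col 'A')) col) cm with hF
    have hkm : k < motifs.length := by omega
    have hr4 : pvIdx ((motifs.getD k "").toList.getD col 'A') < F.length := by
      rw [ihs.1]; exact pvIdx_lt _
    have hic : col < (F.getD (pvIdx ((motifs.getD k "").toList.getD col 'A')) []).length := by
      rw [pvRow_len _ _ _ ihs hr4]; exact hcol
    constructor
    · exact pvShape_inc _ _ _ _ ihs
    · intro r' i'
      rw [pvEnt_inc _ _ _ hr4 hic, ihe]
      have hgd : motifs.getD k "" = motifs[k] := List.getD_eq_getElem _ _ hkm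
      have htake : motifs.take (k + 1) = motifs.take k ++ [motifs[k]] := by
        rw [List.take_add_one]; simp [List.getElem?_eq_getElem hkm]
      have hcnt : pvCnt (motifs.take (k + 1)) col r'
          = pvCnt (motifs.take k) col r'
            + (if r' = pvIdx ((motifs.getD k "").toList.getD col 'A') then 1 else 0) := by
        unfold pvCnt
        rw [htake, List.countP_append, List.countP_cons, List.countP_nil, hgd]
        by_cases hrr : r' = pvIdx (motifs[k].toList.getD col 'A')
        · rw [if_pos hrr,
            if_pos (beq_iff_eq.mpr hrr.symm :
              (pvIdx (motifs[k].toList.getD col 'A') == r') = true)]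
          push_cast; ring
        · rw [if_neg hrr,
            if_neg (show ¬(pvIdx (motifs[k].toList.getD col 'A') == r') = true by
              simp only [beq_iff_eq]; exact fun h => hrr h.symm)]
          push_cast; ring
      rw [hcnt]
      by_cases hi : i' = col
      · subst hi
        split_ifs <;> omega
      · have hne : ¬(r' = pvIdx ((motifs.getD k "").toList.getD col 'A') ∧ i' = col) := by
          tauto
        rw [if_neg hne, if_neg hi, if_neg hi]
        omega

-- A's outer loop over the columns
theorem pvA_outer (motifs : List String) (L : Nat)
    (hL : L = (motifs.headD "").toList.length) :
    ∀ n, n ≤ L →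
      pvShape ((List.range n).foldl
        (fun cm i =>
          (List.range motifs.length).foldl
            (fun cm j => pvInc cm (pvIdx ((motifs.getD j "").toList.getD i 'A')) i)
            ((List.range 4).foldl
              (fun cm nucleotid => cm.modify nucleotid (fun row => row ++ [0])) cm))
        [[], [], [], []]) n ∧
      ∀ r' i', pvEnt ((List.range n).foldl
        (fun cm i =>
          (List.range motifs.length).foldl
            (fun cm j => pvInc cm (pvIdx ((motifs.getD j "").toList.getD i 'A')) i)
            ((List.range 4).foldl
              (fun cm nucleotid => cm.modify nucleotid (fun row => row ++ [0])) cm))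
        [[], [], [], []]) r' i'
        = if i' < n then pvCnt motifs i' r' else 0 := by
  intro n
  induction n with
  | zero =>
    intro _
    constructor
    · exact ⟨rfl, by intro row hm; fin_cases hm <;> rfl⟩
    · intro r' i'
      simp only [List.range_zero, List.foldl_nil]
      have : pvEnt [[], [], [], []] r' i' = 0 := by
        unfold pvEnt
        rcases r' with _ | _ | _ | _ | r' <;> simp [List.getD]
      simp [this]
  | succ n ih =>
    intro hn
    obtain ⟨ihs, ihe⟩ := ih (by omega)
    rw [show List.range (n + 1) = List.range n ++ [n] from List.range_succ,
      List.foldl_append, List.foldl_cons, List.foldl_nil]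
    set F := (List.range n).foldl
      (fun cm i =>
        (List.range motifs.length).foldl
          (fun cm j => pvInc cm (pvIdx ((motifs.getD j "").toList.getD i 'A')) i)
          ((List.range 4).foldl
            (fun cm nucleotid => cm.modify nucleotid (fun row => row ++ [0])) cm))
      [[], [], [], []] with hF
    obtain ⟨has, hae⟩ := pvApp4 F n ihs
    obtain ⟨his, hie⟩ := pvA_inner motifs n (n + 1) (by omega) motifs.length (le_refl _) _ has
    constructor
    · exact his
    · intro r' i'
      rw [hie, hae, ihe, List.take_length]
      by_cases hi : i' = n
      · subst hi; simp
      · by_cases hi2 : i' < n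
        · simp [hi, hi2, show i' < n + 1 by omega]
        · simp [hi, hi2, show ¬ i' < n + 1 by omega]

-- extensionality through pvShape/pvEnt
theorem pvMat_ext (X Y : List (List Int)) (L : Nat) (hX : pvShape X L) (hY : pvShape Y L)
    (h : ∀ r i, r < 4 → i < L → pvEnt X r i = pvEnt Y r i) : X = Y := by
  apply List.ext_getElem (by rw [hX.1, hY.1])
  intro r h1 h2
  apply List.ext_getElem
    (by rw [hX.2 _ (List.getElem_mem _), hY.2 _ (List.getElem_mem _)])
  intro i hi1 hi2
  have hr4 : r < 4 := by rw [← hX.1]; exact h1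
  have hiL : i < L := by rw [← hX.2 _ (List.getElem_mem h1)]; exact hi1
  have he := h r i hr4 hiL
  unfold pvEnt at he
  rwa [List.getD_eq_getElem _ _ h1, List.getD_eq_getElem _ _ h2,
    List.getD_eq_getElem _ _ hi1, List.getD_eq_getElem _ _ hi2] at he

theorem pv_getD_map {α β : Type} (l : List α) (f : α → β) (r : Nat)
    (hr : r < l.length) (d : α) (d' : β) :
    (l.map f).getD r d' = f (l.getD r d) := by
  rw [List.getD_eq_getElem _ _ (by simpa using hr), List.getElem_map,
    List.getD_eq_getElem _ _ hr]

theorem pv_getD_zero {α : Type} (l : List α) (d : α) : l.getD 0 d = l.headD d := by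
  cases l <;> rfl

theorem pv_tail_getD {α : Type} (l : List α) (i : Nat) (d : α) :
    l.tail.getD i d = l.getD (i + 1) d := by
  cases l <;> simp [List.getD]

-- zip(*ls) in closed form: if all rows have length ≥ n and some row has length n
theorem pvZip_eq (n : Nat) : ∀ ls : List (List Char), ls ≠ [] →
    (∀ l ∈ ls, n ≤ l.length) → (∃ l ∈ ls, l.length = n) →
    pvZip ls = (List.range n).map (fun i => ls.map (fun l => l.getD i ' ')) := by
  induction n with
  | zero =>
    intro ls hne hge ⟨l, hl, hlen⟩
    rw [pvZip, dif_pos (Or.inr (List.any_eq_true.mpr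
      ⟨l, hl, by simp [List.isEmpty_iff, List.length_eq_zero_iff.mp hlen]⟩))]
    simp
  | succ n ih =>
    intro ls hne hge ⟨l, hl, hlen⟩
    have hno : ¬(ls = [] ∨ ls.any List.isEmpty) := by
      rintro (h | h)
      · exact hne h
      · obtain ⟨l', hl', he⟩ := List.any_eq_true.mp h
        have := hge l' hl'
        rw [List.isEmpty_iff] at he
        simp [he] at this
    rw [pvZip, dif_neg hno]
    have hIH : pvZip (ls.map List.tail)
        = (List.range n).map (fun i => (ls.map List.tail).map (fun l => l.getD i ' ')) := by
      apply ih
      · simp [hne]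
      · intro l' hl'
        obtain ⟨l0, hl0, rfl⟩ := List.mem_map.mp hl'
        have := hge l0 hl0
        simp [List.length_tail]
        omega
      · exact ⟨l.tail, List.mem_map.mpr ⟨l, hl, rfl⟩, by simp [List.length_tail, hlen]⟩
    rw [hIH, List.range_succ_eq_map, List.map_cons, List.map_map]
    congr 1
    · exact List.map_congr_left (fun l' _ => (pv_getD_zero l' ' ').symm)
    · apply List.map_congr_left
      intro i _
      rw [List.map_map]
      exact List.map_congr_left (fun l' _ => by
        simp only [Function.comp]; rw [pv_tail_getD])

-- row index r picks nucleotide "ACGT"[r] (for in-alphabet characters)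
theorem pvIdx_beq (c : Char) (r : Nat) (hc : c ∈ (['A', 'C', 'G', 'T'] : List Char))
    (hr : r < 4) :
    (pvIdx c == r) = (c == (['A', 'C', 'G', 'T'] : List Char).getD r ' ') := by
  fin_cases hc <;> (rcases r with _ | _ | _ | _ | r) <;> first | decide | omega

theorem get_count_matrix_spec : Claim_equal_get_count_matrix := by
  unfold Claim_equal_get_count_matrix
  intro motifs _ hpre
  obtain ⟨hne, hall⟩ := hpre
  unfold Spec_get_count_matrix get_count_matrix get_count_matrix_alt
  set L := (motifs.headD "").toList.length with hL
  -- A side: shape and entries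
  obtain ⟨hAs, hAe⟩ := pvA_outer motifs L rfl L (le_refl L)
  set FA := (List.range L).foldl
    (fun cm i =>
      (List.range motifs.length).foldl
        (fun cm j => pvInc cm (pvIdx ((motifs.getD j "").toList.getD i 'A')) i)
        ((List.range 4).foldl
          (fun cm nucleotid => cm.modify nucleotid (fun row => row ++ [0])) cm))
    [[], [], [], []] with hFA
  have hAs' : pvShape (FA.map (fun row => row.map (· + pvADDED_CONST))) L := by
    refine ⟨by simpa using hAs.1, ?_⟩
    intro row hm
    obtain ⟨row0, hm0, rfl⟩ := List.mem_map.mp hm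
    simpa using hAs.2 _ hm0
  -- B side: the zip in closed form
  have hzip : pvZip (motifs.map (·.toList))
      = (List.range L).map (fun i => (motifs.map (·.toList)).map (fun l => l.getD i ' ')) := by
    apply pvZip_eq
    · simp [hne]
    · intro l hl
      obtain ⟨m, hm, rfl⟩ := List.mem_map.mp hl
      exact (hall m hm).1
    · obtain ⟨m0, rest, rfl⟩ := List.exists_cons_of_ne_nil hne
      exact ⟨m0.toList, List.mem_map.mpr ⟨m0, List.mem_cons_self, rfl⟩, by simp [hL]⟩
  have hACGT : "ACGT".toList = (['A', 'C', 'G', 'T'] : List Char) := rfl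
  have hBs : pvShape (("ACGT".toList).map (fun nuc =>
      (pvZip (motifs.map (·.toList))).map
        (fun col => ((col.count nuc : Int) + pvADDED_CONST)))) L := by
    constructor
    · simp [hACGT]
    · intro row hm
      obtain ⟨nuc, _, rfl⟩ := List.mem_map.mp hm
      simp [hzip]
  apply pvMat_ext _ _ L hAs' hBs
  intro r i hr4 hiL
  -- A entry
  have hrlen : r < FA.length := by rw [hAs.1]; exact hr4
  have hilen : i < (FA.getD r []).length := by
    rw [pvRow_len _ _ _ hAs hrlen]; exact hiL
  have hmapEnt : pvEnt (FA.map (fun row => row.map (· + pvADDED_CONST))) r i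
      = pvEnt FA r i + pvADDED_CONST := by
    unfold pvEnt
    rw [pv_getD_map _ _ _ hrlen [], pv_getD_map _ _ _ hilen 0]
  -- B entry
  have hlen4 : r < ("ACGT".toList).length := by simpa [hACGT] using hr4
  have hlenL : i < (pvZip (motifs.map (·.toList))).length := by simp [hzip, hiL]
  have hBEnt : pvEnt (("ACGT".toList).map (fun nuc =>
      (pvZip (motifs.map (·.toList))).map
        (fun col => ((col.count nuc : Int) + pvADDED_CONST)))) r i
      = ((((pvZip (motifs.map (·.toList))).getD i []).count
          (("ACGT".toList).getD r ' ') : Int) + pvADDED_CONST) := by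
    unfold pvEnt
    rw [pv_getD_map _ _ _ hlen4 ' ', pv_getD_map _ _ _ hlenL []]
  have hcol : (pvZip (motifs.map (·.toList))).getD i []
      = motifs.map (fun m => m.toList.getD i ' ') := by
    rw [hzip, pv_getD_map _ _ _ (by simp [hiL]) 0]
    rw [List.getD_eq_getElem _ _ (by simp [hiL]), List.getElem_range, List.map_map]
    rfl
  rw [hmapEnt, hBEnt, hAe, if_pos hiL, hcol]
  -- the two counts agree
  set nucr := ("ACGT".toList).getD r ' ' with hnucr
  have hcount : (motifs.map (fun m => m.toList.getD i ' ')).count nucr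
      = motifs.countP (fun m => pvIdx (m.toList.getD i 'A') == r) := by
    rw [List.count_eq_countP, List.countP_map]
    apply List.countP_congr
    intro m hm
    obtain ⟨hlen, hchars⟩ := hall m hm
    have him : i < m.toList.length := lt_of_lt_of_le hiL hlen
    have hgd : m.toList.getD i ' ' = m.toList.getD i 'A' := by
      rw [List.getD_eq_getElem _ _ him, List.getD_eq_getElem _ _ him]
    have hcmem : m.toList.getD i 'A' ∈ (['A', 'C', 'G', 'T'] : List Char) := by
      have htl : i < (m.toList.take L).length := by
        rw [List.length_take]; omega
      have := List.all_eq_true.mp hchars _ (List.getElem_mem htl)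
      rw [List.getElem_take, ← List.getD_eq_getElem m.toList 'A' him] at this
      simpa using this
    simp only [Function.comp]
    rw [hgd, pvIdx_beq _ _ hcmem hr4, hnucr, hACGT]
  unfold pvCnt
  rw [hcount]
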